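-- pv_equiv track=rewrite | github.com/abingham/ackward | site_scons/ackward/forward_declarations.py | declare
-- ===== SOURCE A (Python) =====
-- def declare(decl):
--     if len(decl) == 0:
--         return str()
--
--     elif len(decl) == 1:
--         return '{0};'.format(decl[0])
--
--     else:
--         return 'namespace {0} {{ {1} }}'.format(decl[0],
--                                                 declare(decl[1:]))
-- ===== SOURCE B (Python) =====
-- def declare(decl):
--     if len(decl) == 0:
--         return ''
--     prefix = ''.join('namespace {0} {{ '.format(d) for d in decl[:-1])
--     middle = '{0};'.format(decl[-1])
--     suffix = ' }' * (len(decl) - 1)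
--     return prefix + middle + suffix
-- ===== Notes on version B (the rewrite author's own statement) =====
-- stated objective: faster
-- what changed: Replaced the slice-based structural recursion (which copies decl[1:] at each level) by a flat one-pass construction: a joined prefix of 'namespace d { ' headers over decl[:-1], the terminal 'last;', and closing braces from string repetition ' }' * (len(decl)-1).
import Mathlib
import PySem

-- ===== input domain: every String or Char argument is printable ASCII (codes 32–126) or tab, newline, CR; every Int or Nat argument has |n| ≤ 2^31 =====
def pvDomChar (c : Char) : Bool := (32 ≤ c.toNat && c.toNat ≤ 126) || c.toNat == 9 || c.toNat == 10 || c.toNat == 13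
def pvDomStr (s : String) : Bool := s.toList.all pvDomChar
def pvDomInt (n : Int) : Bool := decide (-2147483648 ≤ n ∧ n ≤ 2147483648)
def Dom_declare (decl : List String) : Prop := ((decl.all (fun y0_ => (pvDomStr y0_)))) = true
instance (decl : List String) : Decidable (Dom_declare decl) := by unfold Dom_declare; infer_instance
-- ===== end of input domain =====

-- B replaces A's slice-based recursion by a flat prefix ++ "last;" ++ repeated-" }" construction (simpler, one pass).

-- ===== PORT A =====
-- literal port of A's recursion on decl (decl[1:] is the tail)
def declare : List String → String
  | [] => ""
  | [d] => d ++ ";"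
  | d :: rest => "namespace " ++ d ++ " { " ++ declare rest ++ " }"

-- ===== PORT B =====
def declare_alt (decl : List String) : String :=
  if decl.length = 0 then ""
  else
    String.join (decl.dropLast.map (fun d => "namespace " ++ d ++ " { "))
      ++ (decl.getLast! ++ ";")
      ++ String.join (List.replicate (decl.length - 1) " }")

-- ===== PRECONDITION & SPEC =====
def Spec_declare (decl : List String) (out : String) : Prop := out = declare_alt decl
instance (decl : List String) (out : String) : Decidable (Spec_declare decl out) := by unfold Spec_declare; infer_instance

-- ===== CLAIM (what is proved, stated in full; the proofs are below) =====
def Claim_equal_declare : Prop := ∀ (decl : List String), Dom_declare decl → Spec_declare decl (declare decl)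

-- ===== LEMMAS AND PROOFS =====

lemma foldl_append_init (a : String) (l : List String) :
    List.foldl (fun r s => r ++ s) a l = a ++ List.foldl (fun r s => r ++ s) "" l := by
  induction l generalizing a with
  | nil => simp
  | cons x xs ih => simp only [List.foldl_cons]; rw [ih (a ++ x), ih ("" ++ x)]; simp [String.append_assoc]

lemma declare_eq_alt : ∀ (decl : List String), declare decl = declare_alt decl
  | [] => by simp [declare, declare_alt]
  | [d] => by simp [declare, declare_alt, String.join]
  | d :: e :: rest => by
    have ih := declare_eq_alt (e :: rest)
    simp only [declare, ih, declare_alt]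
    simp [String.join]
    rw [List.replicate_succ', List.foldl_append, foldl_append_init ("namespace " ++ d ++ " { ")]
    simp [String.append_assoc]

-- ===== VERDICT (by name: the statement is the Claim_ definition above) =====
theorem declare_spec : Claim_equal_declare := by
  intro decl _
  exact declare_eq_alt decl
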